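-- pv_equiv track=rewrite | github.com/S-V-R-S/AoC | adventOfCode/2023/day11-2.py | trouNoir
-- ===== SOURCE A (Python) =====
-- def trouNoir(p, p2, ligneAAdd, colonneAAdd):
--     nbrTraverse = 0
--     x =[]
--     x.append(p[0])
--     x.append(p2[0])
--     x.sort()
--     y = []
--     y.append(p[1])
--     y.append(p2[1])
--     y.sort()
--
--     for yt in ligneAAdd:
--         if y[0] < yt < y[1]:
--             nbrTraverse+=1
--     for xt in colonneAAdd:
--         if x[0] < xt < x[1]:
--             nbrTraverse+=1
--
--     return nbrTraverse
-- ===== SOURCE B (Python) =====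
-- def trouNoir(p, p2, ligneAAdd, colonneAAdd):
--     # binary search on sorted copies instead of A's linear membership scans
--     def count_lt(s, v):
--         # number of elements of sorted list s that are < v (bisect_left by hand)
--         left, right = 0, len(s)
--         while left < right:
--             mid = (left + right) // 2
--             if s[mid] < v:
--                 left = mid + 1
--             else:
--                 right = mid
--         return left
--
--     def count_between(a, lo, hi):
--         # number of elements of a strictly between lo and hi
--         if hi <= lo + 1:
--             return 0
--         s = sorted(a)
--         return count_lt(s, hi) - count_lt(s, lo + 1)
--
--     ylo, yhi = (p[1], p2[1]) if p[1] <= p2[1] else (p2[1], p[1])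
--     xlo, xhi = (p[0], p2[0]) if p[0] <= p2[0] else (p2[0], p[0])
--     return count_between(ligneAAdd, ylo, yhi) + count_between(colonneAAdd, xlo, xhi)
-- ===== Notes on version B (the rewrite author's own statement) =====
-- stated objective: alternative
-- what changed: replaces A's linear scans testing each expansion index against the interval by sorting each index list once and subtracting two hand-written binary-search (bisect_left) positions
import Mathlib
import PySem

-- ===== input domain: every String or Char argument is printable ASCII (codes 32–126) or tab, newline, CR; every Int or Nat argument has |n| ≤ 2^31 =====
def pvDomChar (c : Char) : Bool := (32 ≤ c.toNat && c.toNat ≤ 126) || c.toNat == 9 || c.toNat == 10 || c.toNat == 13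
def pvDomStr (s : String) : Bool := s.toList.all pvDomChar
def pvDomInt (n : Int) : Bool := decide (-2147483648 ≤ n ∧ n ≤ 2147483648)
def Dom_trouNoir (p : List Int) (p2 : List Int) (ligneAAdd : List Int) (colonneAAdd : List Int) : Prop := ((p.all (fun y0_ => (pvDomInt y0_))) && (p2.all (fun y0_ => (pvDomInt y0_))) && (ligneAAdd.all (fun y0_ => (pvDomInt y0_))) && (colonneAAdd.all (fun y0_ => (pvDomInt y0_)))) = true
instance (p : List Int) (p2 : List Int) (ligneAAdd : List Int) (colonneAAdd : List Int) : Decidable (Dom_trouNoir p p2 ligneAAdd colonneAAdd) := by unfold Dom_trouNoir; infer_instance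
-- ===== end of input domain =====

-- B replaces A's linear interval scans by sort + hand-written binary search (alternative algorithm, same values).


-- ===== PORT A =====
def trouNoir (p : List Int) (p2 : List Int) (ligneAAdd : List Int) (colonneAAdd : List Int) : Int :=
  -- x = sorted([p[0], p2[0]]); y = sorted([p[1], p2[1]])  (indexing exact under Pre_)
  let x := PySem.List.sorted [PySem.List.pyGetD p 0 0, PySem.List.pyGetD p2 0 0] (fun v => v) false
  let y := PySem.List.sorted [PySem.List.pyGetD p 1 0, PySem.List.pyGetD p2 1 0] (fun v => v) false
  let x0 := PySem.List.pyGetD x 0 0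
  let x1 := PySem.List.pyGetD x 1 0
  let y0 := PySem.List.pyGetD y 0 0
  let y1 := PySem.List.pyGetD y 1 0
  let n1 := ligneAAdd.foldl (fun acc yt => if y0 < yt ∧ yt < y1 then acc + 1 else acc) (0 : Int)
  colonneAAdd.foldl (fun acc xt => if x0 < xt ∧ xt < x1 then acc + 1 else acc) n1

-- ===== PORT B =====
-- count_lt's while loop (binary search); the fuel argument only bounds the iteration count
-- (right - left shrinks each step, so fuel = len s suffices); s[mid] is in range whenever left < right ≤ len s
def pvCountLtGo (s : List Int) (v : Int) : Nat → Nat → Nat → Nat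
  | 0, left, _ => left
  | fuel + 1, left, right =>
    if left < right then
      let mid := (left + right) / 2
      if PySem.List.pyGetD s (mid : Int) 0 < v then pvCountLtGo s v fuel (mid + 1) right
      else pvCountLtGo s v fuel left mid
    else left

def pvCountLt (s : List Int) (v : Int) : Nat := pvCountLtGo s v s.length 0 s.length

def pvCountBetween (a : List Int) (lo hi : Int) : Int :=
  if hi ≤ lo + 1 then 0
  else
    let s := PySem.List.sorted a (fun v => v) false
    (pvCountLt s hi : Int) - (pvCountLt s (lo + 1) : Int)

def trouNoir_alt (p : List Int) (p2 : List Int) (ligneAAdd : List Int) (colonneAAdd : List Int) : Int :=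
  let py1 := PySem.List.pyGetD p 1 0
  let qy1 := PySem.List.pyGetD p2 1 0
  let px0 := PySem.List.pyGetD p 0 0
  let qx0 := PySem.List.pyGetD p2 0 0
  let yp : Int × Int := if py1 ≤ qy1 then (py1, qy1) else (qy1, py1)
  let xp : Int × Int := if px0 ≤ qx0 then (px0, qx0) else (qx0, px0)
  pvCountBetween ligneAAdd yp.1 yp.2 + pvCountBetween colonneAAdd xp.1 xp.2

-- ===== PRECONDITION & SPEC =====
-- A raises IndexError unless p and p2 both have at least two elements.
def Pre_trouNoir (p : List Int) (p2 : List Int) (ligneAAdd : List Int) (colonneAAdd : List Int) : Prop :=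
  2 ≤ p.length ∧ 2 ≤ p2.length
instance (p : List Int) (p2 : List Int) (ligneAAdd : List Int) (colonneAAdd : List Int) : Decidable (Pre_trouNoir p p2 ligneAAdd colonneAAdd) := by unfold Pre_trouNoir; infer_instance
def pvWitness_trouNoir : List Int × List Int × List Int × List Int := ([0, 0], [3, 3], [1, 2], [1, 2])

def Spec_trouNoir (p : List Int) (p2 : List Int) (ligneAAdd : List Int) (colonneAAdd : List Int) (out : Int) : Prop := out = trouNoir_alt p p2 ligneAAdd colonneAAdd
instance (p : List Int) (p2 : List Int) (ligneAAdd : List Int) (colonneAAdd : List Int) (out : Int) : Decidable (Spec_trouNoir p p2 ligneAAdd colonneAAdd out) := by unfold Spec_trouNoir; infer_instance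

-- ===== CLAIM (what is proved, stated in full; the proofs are below) =====
def Claim_equal_trouNoir : Prop := ∀ (p : List Int) (p2 : List Int) (ligneAAdd : List Int) (colonneAAdd : List Int), Dom_trouNoir p p2 ligneAAdd colonneAAdd → Pre_trouNoir p p2 ligneAAdd colonneAAdd → Spec_trouNoir p p2 ligneAAdd colonneAAdd (trouNoir p p2 ligneAAdd colonneAAdd)

-- ===== LEMMAS AND PROOFS =====

-- if all indices < k hold the property and all indices ≥ k fail it, countP is k
theorem pv_countP_eq_of_cut (s : List Int) (v : Int) (k : Nat) (hk : k ≤ s.length)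
    (hlt : ∀ i, (h : i < s.length) → i < k → s[i] < v)
    (hge : ∀ i, (h : i < s.length) → k ≤ i → v ≤ s[i]) :
    s.countP (fun x => decide (x < v)) = k := by
  induction s generalizing k with
  | nil => simp at hk; simp; omega
  | cons a t ih =>
    cases k with
    | zero =>
      simp only [List.countP_cons]
      have h0 : v ≤ a := hge 0 (by simp) (by omega)
      have : t.countP (fun x => decide (x < v)) = 0 := by
        apply ih 0 (by omega)
        · intro i h hi; omega
        · intro i h _; exact hge (i + 1) (by simpa using Nat.succ_lt_succ h) (by omega)
      simp [this, not_lt.2 h0]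
    | succ k' =>
      simp only [List.countP_cons]
      have h0 : a < v := hlt 0 (by simp) (by omega)
      have : t.countP (fun x => decide (x < v)) = k' := by
        apply ih k' (by simp at hk; omega)
        · intro i h hi; exact hlt (i + 1) (by simpa using Nat.succ_lt_succ h) (by omega)
        · intro i h hi; exact hge (i + 1) (by simpa using Nat.succ_lt_succ h) (by omega)
      simp [this, h0]

theorem pv_countLtGo_spec (s : List Int) (v : Int) (hs : s.Pairwise (· ≤ ·)) :
    ∀ fuel left right, right - left ≤ fuel → left ≤ right → right ≤ s.length →
    (∀ i, (h : i < s.length) → i < left → s[i] < v) →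
    (∀ i, (h : i < s.length) → right ≤ i → v ≤ s[i]) →
    pvCountLtGo s v fuel left right = s.countP (fun x => decide (x < v)) := by
  have hmono : ∀ i j, (hi : i < s.length) → (hj : j < s.length) → i ≤ j → s[i] ≤ s[j] := by
    intro i j hi hj hij
    rcases Nat.lt_or_ge i j with hlt | hge
    · exact (List.pairwise_iff_getElem.mp hs) i j hi hj hlt
    · have : i = j := by omega
      subst this; exact le_refl _
  intro fuel
  induction fuel with
  | zero =>
    intro left right hfuel hle hlen hlt hge
    have heq : left = right := by omega
    subst heq
    show left = _
    exact (pv_countP_eq_of_cut s v left (by omega) hlt (fun i h hi => hge i h hi)).symm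
  | succ n ih =>
    intro left right hfuel hle hlen hlt hge
    show (if left < right then
        if PySem.List.pyGetD s (((left + right) / 2 : Nat) : Int) 0 < v
        then pvCountLtGo s v n ((left + right) / 2 + 1) right
        else pvCountLtGo s v n left ((left + right) / 2)
      else left) = _
    by_cases hlr : left < right
    · simp only [hlr, if_true]
      have hmidlt : (left + right) / 2 < s.length := by omega
      have hget : PySem.List.pyGetD s (((left + right) / 2 : Nat) : Int) 0 = s[(left + right) / 2] := by
        rw [PySem.List.pyGetD_natCast]; exact List.getD_eq_getElem s 0 hmidlt
      by_cases hc : PySem.List.pyGetD s (((left + right) / 2 : Nat) : Int) 0 < v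
      · simp only [hc, if_true]
        apply ih ((left + right) / 2 + 1) right (by omega) (by omega) hlen
        · intro i h hi
          have : s[i] ≤ s[(left + right) / 2] := hmono i _ h hmidlt (by omega)
          calc s[i] ≤ s[(left + right) / 2] := this
            _ < v := by rwa [hget] at hc
        · exact hge
      · simp only [hc, if_false]
        apply ih left ((left + right) / 2) (by omega) (by omega) (by omega) hlt
        · intro i h hi
          have : s[(left + right) / 2] ≤ s[i] := hmono _ i hmidlt h (by omega)
          have hv : v ≤ s[(left + right) / 2] := by rw [hget] at hc; omega
          omega
    · simp only [hlr, if_false]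
      exact (pv_countP_eq_of_cut s v left (by omega) hlt
        (fun i h hi => hge i h (by omega))).symm

theorem pv_countLt_spec (s : List Int) (v : Int) (hs : s.Pairwise (· ≤ ·)) :
    pvCountLt s v = s.countP (fun x => decide (x < v)) := by
  apply pv_countLtGo_spec s v hs s.length 0 s.length (by omega) (by omega) (by omega)
  · intro i h hi; omega
  · intro i h hi; omega

-- splitting the strict-lt count at lo (needs lo + 1 < hi)
theorem pv_countP_split (a : List Int) (lo hi : Int) (h : lo + 1 < hi) :
    a.countP (fun x => decide (x < hi)) =
      a.countP (fun x => decide (x < lo + 1)) + a.countP (fun x => decide (lo < x ∧ x < hi)) := by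
  induction a with
  | nil => simp
  | cons b t ih =>
    simp only [List.countP_cons, decide_eq_true_eq, ih]
    split_ifs <;> omega

theorem pv_countBetween_spec (a : List Int) (lo hi : Int) :
    pvCountBetween a lo hi = (a.countP (fun x => decide (lo < x ∧ x < hi)) : Int) := by
  unfold pvCountBetween
  by_cases hcase : hi ≤ lo + 1
  · have h0 : a.countP (fun x => decide (lo < x ∧ x < hi)) = 0 := by
      rw [List.countP_eq_zero]
      intro x _; simp only [decide_eq_true_eq]; omega
    rw [if_pos hcase, h0]; simp
  · rw [if_neg hcase]
    show (pvCountLt (PySem.List.sorted a (fun v => v) false) hi : Int)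
        - (pvCountLt (PySem.List.sorted a (fun v => v) false) (lo + 1) : Int)
        = (a.countP (fun x => decide (lo < x ∧ x < hi)) : Int)
    have hsorted : (PySem.List.sorted a (fun v => v) false).Pairwise (· ≤ ·) := by
      simpa using PySem.List.sorted_pairwise a (fun v => v)
    have hperm : (PySem.List.sorted a (fun v => v) false).Perm a := PySem.List.sorted_perm a _ _
    rw [pv_countLt_spec _ _ hsorted, pv_countLt_spec _ _ hsorted,
        hperm.countP_eq, hperm.countP_eq, pv_countP_split a lo hi (by omega)]
    push_cast
    ring

-- A's foldl is a count
theorem pv_foldl_count (l : List Int) (lo hi : Int) (a : Int) :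
    l.foldl (fun acc t => if lo < t ∧ t < hi then acc + 1 else acc) a
      = a + (l.countP (fun x => decide (lo < x ∧ x < hi)) : Int) := by
  induction l generalizing a with
  | nil => simp
  | cons b t ih =>
    simp only [List.foldl_cons, List.countP_cons, ih]
    by_cases hb : lo < b ∧ b < hi <;> simp [hb] <;> omega

-- sorted of a two-element list
theorem pv_sorted_pair (a b : Int) :
    PySem.List.sorted [a, b] (fun v => v) false = if a ≤ b then [a, b] else [b, a] := by
  by_cases h : a ≤ b
  · rw [if_pos h]
    exact PySem.List.sorted_id_eq_of_perm_of_pairwise _ _ (List.Perm.refl _) (by simp [h])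
  · rw [if_neg h]
    exact PySem.List.sorted_id_eq_of_perm_of_pairwise _ _ (List.Perm.swap a b []) (by simp; omega)

theorem pv_pyGetD_pair1 (u w : Int) : PySem.List.pyGetD [u, w] 1 0 = w := by
  simp [PySem.List.pyGetD, PySem.List.pyGet?, PySem.List.pyIdx?]

-- ===== VERDICT (by name: the statement is the Claim_ definition above) =====
theorem trouNoir_spec : Claim_equal_trouNoir := by
  intro p p2 ligneAAdd colonneAAdd _hdom hpre
  obtain ⟨hp, hp2⟩ := hpre
  match p, p2 with
  | pa :: pb :: pt, qa :: qb :: qt =>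
    simp only [Spec_trouNoir, trouNoir, trouNoir_alt]
    have g0 : PySem.List.pyGetD (pa :: pb :: pt) 0 0 = pa := by
      have hc : (0 : Int) ≤ (pt.length : Int) + 1 := by omega
      simp [PySem.List.pyGetD, PySem.List.pyGet?, PySem.List.pyIdx?, hc]
    have g1 : PySem.List.pyGetD (pa :: pb :: pt) 1 0 = pb := by
      simp [PySem.List.pyGetD, PySem.List.pyGet?, PySem.List.pyIdx?]
    have h0 : PySem.List.pyGetD (qa :: qb :: qt) 0 0 = qa := by
      have hc : (0 : Int) ≤ (qt.length : Int) + 1 := by omega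
      simp [PySem.List.pyGetD, PySem.List.pyGet?, PySem.List.pyIdx?, hc]
    have h1 : PySem.List.pyGetD (qa :: qb :: qt) 1 0 = qb := by
      simp [PySem.List.pyGetD, PySem.List.pyGet?, PySem.List.pyIdx?]
    rw [g0, g1, h0, h1, pv_sorted_pair, pv_sorted_pair,
        pv_countBetween_spec, pv_countBetween_spec, pv_foldl_count, pv_foldl_count]
    by_cases hx : pa ≤ qa <;> by_cases hy : pb ≤ qb <;>
      simp [hx, hy, pv_pyGetD_pair1]
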